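-- pv_equiv track=rewrite | github.com/axthoison/sigmoid_hw | L16.py | task29
-- ===== SOURCE A (Python) =====
-- def task29(n):
--     def factorial(x):
--         if x == 0 or x == 1:
--             return 1
--         else:
--             return x * factorial(x - 1)
--
--     for i in range(1, n + 1):
--         yield str(factorial(i))
-- ===== SOURCE B (Python) =====
-- def task29(n):
--     f = 1
--     for i in range(1, n + 1):
--         f *= i
--         yield str(f)
-- ===== Notes on version B (the rewrite author's own statement) =====
-- stated objective: faster
-- what changed: B maintains a running product updated by one multiplication per step instead of recomputing each factorial from scratch with a recursive helper; intended as asymptotically fewer multiplications, measured ~2x at the largest size (str() conversion of huge ints dominates both).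
import Mathlib
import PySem

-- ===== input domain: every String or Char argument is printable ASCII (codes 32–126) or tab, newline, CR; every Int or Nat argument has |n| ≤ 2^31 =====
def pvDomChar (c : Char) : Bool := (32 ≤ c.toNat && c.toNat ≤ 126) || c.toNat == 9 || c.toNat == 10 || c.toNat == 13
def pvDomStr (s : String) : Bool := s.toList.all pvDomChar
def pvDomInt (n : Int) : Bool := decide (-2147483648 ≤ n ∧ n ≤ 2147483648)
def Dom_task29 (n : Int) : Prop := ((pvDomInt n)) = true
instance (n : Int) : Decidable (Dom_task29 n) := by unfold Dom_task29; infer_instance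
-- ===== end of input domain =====

-- B replaces A's per-element recursive factorial with a running product, one multiplication per step (measured ~2x at the largest timed size); equivalence is about the yielded sequence as a list.

-- ===== PORT A =====
-- A's inner 'factorial' is only ever called with arguments ≥ 1; it is ported by
-- structural recursion on the Nat value of its argument, branch for branch.
def pvFactA : Nat → Int
  | 0 => 1
  | 1 => 1
  | x + 2 => ((x : Int) + 2) * pvFactA (x + 1)

def task29 (n : Int) : List String :=
  (PySem.List.pyRange 1 (n + 1) 1).map (fun i => PySem.Int.toStr (pvFactA i.toNat))

-- ===== PORT B =====
def task29_alt (n : Int) : List String :=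
  ((PySem.List.pyRange 1 (n + 1) 1).foldl
    (fun (st : Int × List String) i =>
      (st.1 * i, st.2 ++ [PySem.Int.toStr (st.1 * i)]))
    (1, [])).2

-- ===== PRECONDITION & SPEC =====
def Spec_task29 (n : Int) (out : List String) : Prop := out = task29_alt n
instance (n : Int) (out : List String) : Decidable (Spec_task29 n out) := by unfold Spec_task29; infer_instance

-- ===== CLAIM (what is proved, stated in full; the proofs are below) =====
def Claim_equal_task29 : Prop := ∀ (n : Int), Dom_task29 n → Spec_task29 n (task29 n)

-- ===== LEMMAS AND PROOFS =====
theorem pvFactA_succ (k : Nat) : pvFactA (k + 1) = pvFactA k * ((k : Int) + 1) := by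
  cases k with
  | zero => simp [pvFactA]
  | succ j =>
      show pvFactA (j + 2) = pvFactA (j + 1) * ((j : Int) + 1 + 1)
      rw [pvFactA]
      push_cast
      ring
theorem pv_fold_inv (k : Nat) :
    (PySem.List.pyRange 1 ((k : Int) + 1) 1).foldl
      (fun (st : Int × List String) i =>
        (st.1 * i, st.2 ++ [PySem.Int.toStr (st.1 * i)]))
      (1, [])
    = (pvFactA k,
       (PySem.List.pyRange 1 ((k : Int) + 1) 1).map
         (fun i => PySem.Int.toStr (pvFactA i.toNat))) := by
  induction k with
  | zero => simp [PySem.List.pyRange_one_eq_nil, pvFactA]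
  | succ k ih =>
      have h1 : (1 : Int) ≤ (k : Int) + 1 := by omega
      have hsplit : PySem.List.pyRange 1 ((k : Int) + 1 + 1) 1
          = PySem.List.pyRange 1 ((k : Int) + 1) 1 ++ [(k : Int) + 1] :=
        PySem.List.pyRange_one_succ_right h1
      have htn : ((k : Int) + 1).toNat = k + 1 := by omega
      push_cast
      rw [hsplit, List.foldl_append, List.map_append, ih]
      simp [htn, pvFactA_succ k]

theorem task29_eq (n : Int) : task29 n = task29_alt n := by
  unfold task29 task29_alt
  by_cases h : n ≤ 0
  · rw [PySem.List.pyRange_one_eq_nil (by omega)]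
    simp
  · have hn : n = ((n.toNat : Int)) := by omega
    rw [hn, pv_fold_inv n.toNat]

-- ===== VERDICT (by name: the statement is the Claim_ definition above) =====
theorem task29_spec : Claim_equal_task29 := by
  intro n _
  exact task29_eq n
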